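-- pv_equiv track=rewrite | github.com/ogoine/md2smf | md2smf.py | smart_replace
-- ===== SOURCE A (Python) =====
-- SINGLE_LEFT_QUOTE = r'\lquote '
--
-- SINGLE_RIGHT_QUOTE = r'\rquote '
--
-- DOUBLE_LEFT_QUOTE = r'\ldblquote '
--
-- DOUBLE_RIGHT_QUOTE = r'\rdblquote '
--
-- EM_DASH = r'\emdash '
--
-- def char_weight(string, index):
--     """Return a weight of 0-2 for the char at the given index, used for deciding quote direction"""
--
--     if index < 0 or index >= len(string):
--         return 0
--     if string[index] == ' ':
--         return 0
--     if string[index].isalnum():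
--         return 2
--     return 1 # symbols
--
-- def substitute(string, index, substitute):
--     """Replace the char at index in string with substitute (str)"""
--
--     return string[:index] + substitute + string[index + 1:]
--
-- def smart_replace(line):
--     """Replace dumb quotes with smart, apply italics, etc."""
--
--     # start with simple substitutions
--     line = line.replace("--", EM_DASH)
--     line = line.replace('  ', ' ')
--     line = line.replace('  ', ' ')
--
--     # now parse more contextual ones
--     italics_on = False
--     index = 0
--     while index < len(line):
--         if line[index] == "'":
--             if char_weight(line, index - 1) < char_weight(line, index + 1):
--                 line = substitute(line, index, SINGLE_LEFT_QUOTE)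
--                 index += len(SINGLE_LEFT_QUOTE)
--             else:
--                 line = substitute(line, index, SINGLE_RIGHT_QUOTE)
--                 index += len(SINGLE_RIGHT_QUOTE)
--         elif line[index] == '"':
--             if char_weight(line, index - 1) < char_weight(line, index + 1):
--                 line = substitute(line, index, DOUBLE_LEFT_QUOTE)
--                 index += len(DOUBLE_LEFT_QUOTE)
--             else:
--                 line = substitute(line, index, DOUBLE_RIGHT_QUOTE)
--                 index += len(DOUBLE_RIGHT_QUOTE)
--         elif line[index] == '*':
--             if italics_on:
--                 line = substitute(line, index, r'\i0 ')
--                 index += len(r'\i0 ')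
--             else:
--                 line = substitute(line, index, r'\i ')
--                 index += len(r'\i ')
--             italics_on = not italics_on
--         else:
--             index += 1
--     if italics_on:
--         line += r'\i0 '
--     return line
-- ===== SOURCE B (Python) =====
-- SINGLE_LEFT_QUOTE = r'\lquote '
-- SINGLE_RIGHT_QUOTE = r'\rquote '
-- DOUBLE_LEFT_QUOTE = r'\ldblquote '
-- DOUBLE_RIGHT_QUOTE = r'\rdblquote '
-- EM_DASH = r'\emdash '
--
-- def _weight(ch):
--     """Weight of a single char for quote-direction decisions."""
--     if ch == ' ':
--         return 0
--     if ch.isalnum():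
--         return 2
--     return 1
--
-- def smart_replace(line):
--     """Replace dumb quotes with smart, apply italics, etc."""
--     line = line.replace("--", EM_DASH)
--     line = line.replace('  ', ' ')
--     line = line.replace('  ', ' ')
--
--     # pass 1: italics markup only, one fold over the characters
--     mid = []
--     italics_on = False
--     for ch in line:
--         if ch == '*':
--             mid.append(r'\i0 ' if italics_on else r'\i ')
--             italics_on = not italics_on
--         else:
--             mid.append(ch)
--     chars = list(''.join(mid))
--
--     # pass 2: quotes only; the left context is summarised by the weight of the
--     # last emitted char (substitutions end with a space, weight 0), the right
--     # context is the next not-yet-substituted char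
--     out = []
--     prev_w = 0
--     n = len(chars)
--     for i in range(n):
--         ch = chars[i]
--         if ch == "'" or ch == '"':
--             next_w = _weight(chars[i + 1]) if i + 1 < n else 0
--             if ch == "'":
--                 out.append(SINGLE_LEFT_QUOTE if prev_w < next_w else SINGLE_RIGHT_QUOTE)
--             else:
--                 out.append(DOUBLE_LEFT_QUOTE if prev_w < next_w else DOUBLE_RIGHT_QUOTE)
--             prev_w = 0
--         else:
--             out.append(ch)
--             prev_w = _weight(ch)
--     if italics_on:
--         out.append(r'\i0 ')
--     return ''.join(out)
-- ===== Notes on version B (the rewrite author's own statement) =====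
-- stated objective: alternative
-- what changed: A's single interleaved while-loop that mutates the string in place (slice-splice substitution and index re-arithmetic) is replaced by two sequential per-character rebuild passes: one fold handling only the italics asterisks, then one fold handling only quotes, carrying the previous emitted char's weight and peeking one char ahead, with no slicing or index jumps.
import Mathlib
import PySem

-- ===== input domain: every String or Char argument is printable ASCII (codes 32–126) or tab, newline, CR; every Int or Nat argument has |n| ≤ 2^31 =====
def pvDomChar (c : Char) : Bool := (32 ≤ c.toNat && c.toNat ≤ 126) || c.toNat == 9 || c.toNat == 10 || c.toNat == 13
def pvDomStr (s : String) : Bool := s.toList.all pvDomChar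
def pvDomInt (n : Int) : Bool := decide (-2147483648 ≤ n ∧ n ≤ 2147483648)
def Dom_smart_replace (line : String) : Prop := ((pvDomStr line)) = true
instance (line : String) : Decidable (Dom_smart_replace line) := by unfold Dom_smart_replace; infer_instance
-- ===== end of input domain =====

-- B replaces A's in-place-mutating combined while-loop by two sequential rebuild
-- passes (italics fold, then quote fold with carried previous weight); same output.

-- ===== PORT A =====

-- the fixed replacement strings, as character lists
def pvSLQ : List Char := ['\\','l','q','u','o','t','e',' ']
def pvSRQ : List Char := ['\\','r','q','u','o','t','e',' ']
def pvDLQ : List Char := ['\\','l','d','b','l','q','u','o','t','e',' ']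
def pvDRQ : List Char := ['\\','r','d','b','l','q','u','o','t','e',' ']
def pvI : List Char := ['\\','i',' ']
def pvI0 : List Char := ['\\','i','0',' ']

-- char_weight(string, index): guard first (index < 0 or >= len -> 0), then classify the char
def pvCharWeight (s : List Char) (i : Int) : Nat :=
  if i < 0 ∨ (s.length : Int) ≤ i then 0
  else
    let c := s.getD i.toNat ' '
    if c = ' ' then 0 else if c.isAlphanum then 2 else 1

-- substitute(string, index, sub) = string[:index] + sub + string[index+1:]
-- substitute(string, index, sub) = string[:index] + sub + string[index+1:]
def pvSubst (s : List Char) (i : Nat) (sub : List Char) : List Char :=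
  s.take i ++ sub ++ s.drop (i + 1)

-- termination measure fact for the loop below (cited in its decreasing_by)
theorem pvSubst_dec (s sub : List Char) (i : Nat) (h : i < s.length) :
    (pvSubst s i sub).length - (i + sub.length) < s.length - i := by
  simp [pvSubst]
  omega

-- the while-loop of smart_replace: state = (line, index, italics_on); each step
-- consumes exactly one original char, so line.length - index decreases by 1
def pvLoopA (line : List Char) (index : Nat) (it : Bool) : List Char × Bool :=
  if h : index < line.length then
    let c := line.getD index ' '
    if c = '\'' then
      if pvCharWeight line ((index : Int) - 1) < pvCharWeight line ((index : Int) + 1) then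
        pvLoopA (pvSubst line index pvSLQ) (index + pvSLQ.length) it
      else
        pvLoopA (pvSubst line index pvSRQ) (index + pvSRQ.length) it
    else if c = '"' then
      if pvCharWeight line ((index : Int) - 1) < pvCharWeight line ((index : Int) + 1) then
        pvLoopA (pvSubst line index pvDLQ) (index + pvDLQ.length) it
      else
        pvLoopA (pvSubst line index pvDRQ) (index + pvDRQ.length) it
    else if c = '*' then
      if it then
        pvLoopA (pvSubst line index pvI0) (index + pvI0.length) (!it)
      else
        pvLoopA (pvSubst line index pvI) (index + pvI.length) (!it)
    else
      pvLoopA line (index + 1) it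
  else (line, it)
termination_by line.length - index
decreasing_by
  all_goals first
    | exact pvSubst_dec _ _ _ h
    | omega

-- the trailing 'if italics_on: line += \i0' step
def pvFinishA (r : List Char × Bool) : String :=
  String.ofList (if r.2 then r.1 ++ pvI0 else r.1)

def smart_replace (line : String) : String :=
  pvFinishA (pvLoopA (PySem.Str.replace (PySem.Str.replace (PySem.Str.replace line "--" "\\emdash ") "  " " ") "  " " ").toList 0 false)

-- ===== PORT B =====

-- _weight(ch)
def pvW (c : Char) : Nat := if c = ' ' then 0 else if c.isAlphanum then 2 else 1

-- pass 1: italics only; returns the rebuilt chars and the final italics flag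
def pvPass1 : List Char → Bool → List Char × Bool
  | [], it => ([], it)
  | c :: t, it =>
    if c = '*' then
      let r := pvPass1 t (!it)
      ((if it then pvI0 else pvI) ++ r.1, r.2)
    else
      let r := pvPass1 t it
      (c :: r.1, r.2)

-- weight of the next (lookahead) char, 0 at end of string
def pvHeadW : List Char → Nat
  | [] => 0
  | c :: _ => pvW c

-- pass 2: quotes only, carrying the weight of the previously emitted char
def pvPass2 : List Char → Nat → List Char
  | [], _ => []
  | c :: t, w =>
    if c = '\'' then (if w < pvHeadW t then pvSLQ else pvSRQ) ++ pvPass2 t 0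
    else if c = '"' then (if w < pvHeadW t then pvDLQ else pvDRQ) ++ pvPass2 t 0
    else c :: pvPass2 t (pvW c)

-- pass 2 over pass 1's output, then the trailing \i0 append
def pvFinishB (p : List Char × Bool) : String :=
  String.ofList (pvPass2 p.1 0 ++ (if p.2 then pvI0 else []))

def smart_replace_alt (line : String) : String :=
  pvFinishB (pvPass1 (PySem.Str.replace (PySem.Str.replace (PySem.Str.replace line "--" "\\emdash ") "  " " ") "  " " ").toList false)

-- ===== PRECONDITION & SPEC =====
def Spec_smart_replace (line : String) (out : String) : Prop := out = smart_replace_alt line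
instance (line : String) (out : String) : Decidable (Spec_smart_replace line out) := by unfold Spec_smart_replace; infer_instance

-- ===== CLAIM (what is proved, stated in full; the proofs are below) =====
def Claim_equal_smart_replace : Prop := ∀ (line : String), Dom_smart_replace line → Spec_smart_replace line (smart_replace line)

-- ===== LEMMAS AND PROOFS =====

-- combined one-pass reference function: what A's loop computes on the unprocessed
-- suffix, given the italics flag and the weight of the char just left of it
def pvF : List Char → Bool → Nat → List Char × Bool
  | [], it, _ => ([], it)
  | c :: t, it, w =>
    if c = '\'' then
      let r := pvF t it 0
      ((if w < pvHeadW t then pvSLQ else pvSRQ) ++ r.1, r.2)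
    else if c = '"' then
      let r := pvF t it 0
      ((if w < pvHeadW t then pvDLQ else pvDRQ) ++ r.1, r.2)
    else if c = '*' then
      let r := pvF t (!it) 0
      ((if it then pvI0 else pvI) ++ r.1, r.2)
    else
      let r := pvF t it (pvW c)
      (c :: r.1, r.2)

-- weight of the last char of the processed prefix (0 for the empty prefix)
def pvTailW (pre : List Char) : Nat :=
  match pre.getLast? with
  | none => 0
  | some c => pvW c

theorem pvSubst_append (pre : List Char) (c : Char) (t sub : List Char) :
    pvSubst (pre ++ c :: t) pre.length sub = pre ++ sub ++ t := by
  induction pre with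
  | nil => simp [pvSubst]
  | cons x xs ih =>
    simp only [pvSubst, List.length_cons, List.cons_append, List.take_succ_cons,
      List.drop_succ_cons] at *
    simp

theorem pvCharWeight_left (pre rest : List Char) :
    pvCharWeight (pre ++ rest) ((pre.length : Int) - 1) = pvTailW pre := by
  cases pre using List.reverseRecOn with
  | nil => simp [pvCharWeight, pvTailW]
  | append_singleton xs x =>
    have hlen : ((xs ++ [x]).length : Int) - 1 = (xs.length : Nat) := by
      simp
    rw [hlen]
    simp only [pvCharWeight, pvTailW]
    have h1 : ¬ ((xs.length : Int) < 0 ∨ (((xs ++ [x]) ++ rest).length : Int) ≤ (xs.length : Int)) := by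
      simp only [List.length_append, List.length_cons, not_or, not_lt, not_le]
      constructor <;> [positivity; (push_cast; omega)]
    rw [if_neg h1]
    have : ((xs ++ [x]) ++ rest).getD ((xs.length : Int)).toNat ' ' = x := by
      simp [List.getD, List.append_assoc]
    simp [pvW]

theorem pvCharWeight_right (pre : List Char) (c : Char) (t : List Char) :
    pvCharWeight (pre ++ c :: t) ((pre.length : Int) + 1) = pvHeadW t := by
  cases t with
  | nil =>
    rw [pvCharWeight, if_pos (Or.inr (by simp))]
    rfl
  | cons d t' =>
    simp only [pvCharWeight, pvHeadW]
    have h1 : ¬ ((pre.length : Int) + 1 < 0 ∨ ((pre ++ c :: d :: t').length : Int) ≤ (pre.length : Int) + 1) := by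
      simp only [List.length_append, List.length_cons]
      push_cast
      omega
    rw [if_neg h1]
    have h2 : (pre ++ c :: d :: t').getD ((pre.length : Int) + 1).toNat ' ' = d := by
      have : ((pre.length : Int) + 1).toNat = pre.length + 1 := by omega
      rw [this]
      have : pre ++ c :: d :: t' = (pre ++ [c]) ++ d :: t' := by simp
      rw [this, List.getD]
      simp
    simp [pvW]

theorem pvGet_mid (pre : List Char) (c : Char) (t : List Char) :
    (pre ++ c :: t).getD pre.length ' ' = c := by
  simp [List.getD]

-- the main loop invariant: processing pre ++ rest from index = |pre| appends
-- pvF of rest (with the weight of pre's last char) to pre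
theorem pvLoopA_char (rest : List Char) : ∀ (pre : List Char) (it : Bool),
    pvLoopA (pre ++ rest) pre.length it =
      ((pre ++ (pvF rest it (pvTailW pre)).1), (pvF rest it (pvTailW pre)).2) := by
  induction rest with
  | nil => intro pre it; rw [pvLoopA]; simp [pvF]
  | cons c t ih =>
    intro pre it
    rw [pvLoopA]
    have hlt : pre.length < (pre ++ c :: t).length := by simp
    rw [dif_pos hlt, pvGet_mid pre c t]
    rw [pvCharWeight_left pre (c :: t), pvCharWeight_right pre c t]
    by_cases h1 : c = '\''
    · rw [if_pos h1]
      by_cases hw : pvTailW pre < pvHeadW t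
      · rw [if_pos hw, pvSubst_append]
        have : pre.length + pvSLQ.length = (pre ++ pvSLQ).length := by simp
        rw [this, ih (pre ++ pvSLQ) it]
        have ht : pvTailW (pre ++ pvSLQ) = 0 := by simp [pvTailW, pvSLQ, pvW]
        rw [ht]
        simp [pvF, h1, hw]
      · rw [if_neg hw, pvSubst_append]
        have : pre.length + pvSRQ.length = (pre ++ pvSRQ).length := by simp
        rw [this, ih (pre ++ pvSRQ) it]
        have ht : pvTailW (pre ++ pvSRQ) = 0 := by simp [pvTailW, pvSRQ, pvW]
        rw [ht]
        simp [pvF, h1, hw]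
    · rw [if_neg h1]
      by_cases h2 : c = '"'
      · rw [if_pos h2]
        by_cases hw : pvTailW pre < pvHeadW t
        · rw [if_pos hw, pvSubst_append]
          have : pre.length + pvDLQ.length = (pre ++ pvDLQ).length := by simp
          rw [this, ih (pre ++ pvDLQ) it]
          have ht : pvTailW (pre ++ pvDLQ) = 0 := by simp [pvTailW, pvDLQ, pvW]
          rw [ht]
          simp [pvF, h1, h2, hw]
        · rw [if_neg hw, pvSubst_append]
          have : pre.length + pvDRQ.length = (pre ++ pvDRQ).length := by simp
          rw [this, ih (pre ++ pvDRQ) it]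
          have ht : pvTailW (pre ++ pvDRQ) = 0 := by simp [pvTailW, pvDRQ, pvW]
          rw [ht]
          simp [pvF, h1, h2, hw]
      · rw [if_neg h2]
        by_cases h3 : c = '*'
        · rw [if_pos h3]
          cases it with
          | true =>
            simp only [reduceIte, Bool.not_true, pvSubst_append]
            have : pre.length + pvI0.length = (pre ++ pvI0).length := by simp
            rw [this, ih (pre ++ pvI0) false]
            have ht : pvTailW (pre ++ pvI0) = 0 := by simp [pvTailW, pvI0, pvW]
            rw [ht]
            simp [pvF, h1, h2, h3]
          | false =>
            simp only [Bool.false_eq_true, reduceIte, Bool.not_false, pvSubst_append]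
            have : pre.length + pvI.length = (pre ++ pvI).length := by simp
            rw [this, ih (pre ++ pvI) true]
            have ht : pvTailW (pre ++ pvI) = 0 := by simp [pvTailW, pvI, pvW]
            rw [ht]
            simp [pvF, h1, h2, h3]
        · rw [if_neg h3]
          have : pre.length + 1 = (pre ++ [c]).length := by simp
          rw [this]
          have hre : pre ++ c :: t = (pre ++ [c]) ++ t := by simp
          rw [hre, ih (pre ++ [c]) it]
          have ht : pvTailW (pre ++ [c]) = pvW c := by simp [pvTailW]
          rw [ht]
          simp [pvF, h1, h2, h3]

-- the head weight is preserved by pass 1 ('*' and '\\' share weight 1)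
theorem pvHeadW_pass1 (t : List Char) (it : Bool) : pvHeadW (pvPass1 t it).1 = pvHeadW t := by
  cases t with
  | nil => simp [pvPass1]
  | cons c t' =>
    by_cases h : c = '*'
    · subst h
      cases it <;> simp [pvPass1, pvHeadW, pvI, pvI0, pvW]
    · simp [pvPass1, h, pvHeadW]

-- the combined pass equals pass 2 after pass 1
theorem pvF_eq_passes (t : List Char) : ∀ (it : Bool) (w : Nat),
    pvF t it w = ((pvPass2 (pvPass1 t it).1 w), (pvPass1 t it).2) := by
  induction t with
  | nil => intro it w; simp [pvF, pvPass1, pvPass2]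
  | cons c t' ih =>
    intro it w
    by_cases h1 : c = '\''
    · have h3 : c ≠ '*' := by subst h1; decide
      simp only [pvF, pvPass1, pvPass2, if_pos h1, if_neg h3, ih, pvHeadW_pass1]
    · by_cases h2 : c = '"'
      · have h3 : c ≠ '*' := by subst h2; decide
        simp only [pvF, pvPass1, pvPass2, if_neg h1, if_pos h2, if_neg h3, ih, pvHeadW_pass1]
      · by_cases h3 : c = '*'
        · subst h3
          cases it <;>
            simp [pvF, pvPass1, pvPass2, ih, pvW, pvI, pvI0]
        · simp only [pvF, pvPass1, pvPass2, if_neg h1, if_neg h2, if_neg h3, ih]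

-- ===== VERDICT (by name: the statement is the Claim_ definition above) =====
theorem smart_replace_spec : Claim_equal_smart_replace := by
  unfold Claim_equal_smart_replace
  intro line _
  unfold Spec_smart_replace smart_replace smart_replace_alt
  have h := pvLoopA_char ((PySem.Str.replace (PySem.Str.replace (PySem.Str.replace line "--" "\\emdash ") "  " " ") "  " " ").toList) [] false
  simp only [List.nil_append, List.length_nil] at h
  rw [h, pvF_eq_passes]
  have hw : pvTailW [] = 0 := rfl
  rw [hw]
  unfold pvFinishA pvFinishB
  cases (pvPass1 (PySem.Str.replace (PySem.Str.replace (PySem.Str.replace line "--" "\\emdash ") "  " " ") "  " " ").toList false).2 <;> simp
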